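-- pv_equiv track=rewrite | github.com/debjeet214/Python | competitive code/encoding ascii arts.py | encode_ascii_art
-- ===== SOURCE A (Python) =====
-- def encode_ascii_art(ascii_art):
--     lines = ascii_art.split('\n')
--     encoded_lines = []
--     for line in lines:
--         encoded_line = ','.join(str(ord(char)) for char in line)
--         encoded_lines.append(encoded_line)
--     encoded_art = '\n'.join(encoded_lines)
--     return encoded_art
-- ===== SOURCE B (Python) =====
-- def encode_ascii_art(ascii_art):
--     parts = []
--     first_in_line = True
--     for ch in ascii_art:
--         if ch == '\n':
--             parts.append('\n')
--             first_in_line = True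
--         else:
--             if not first_in_line:
--                 parts.append(',')
--             parts.append(str(ord(ch)))
--             first_in_line = False
--     return ''.join(parts)
-- ===== Notes on version B (the rewrite author's own statement) =====
-- stated objective: alternative
-- what changed: Replaces the newline-split plus per-line comma-join plus final newline-join with a single linear pass over the characters that maintains a first-in-line flag and emits separators explicitly into one parts buffer.
import Mathlib
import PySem

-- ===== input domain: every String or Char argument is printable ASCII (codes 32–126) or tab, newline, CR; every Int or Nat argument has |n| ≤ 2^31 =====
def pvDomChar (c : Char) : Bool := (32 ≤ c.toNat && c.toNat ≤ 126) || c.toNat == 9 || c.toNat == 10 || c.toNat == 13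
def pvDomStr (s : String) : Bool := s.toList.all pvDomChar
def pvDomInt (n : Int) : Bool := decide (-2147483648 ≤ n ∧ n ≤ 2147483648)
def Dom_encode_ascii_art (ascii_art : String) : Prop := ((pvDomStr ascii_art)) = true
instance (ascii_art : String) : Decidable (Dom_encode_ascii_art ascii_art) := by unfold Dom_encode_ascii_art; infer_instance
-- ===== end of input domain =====

-- B replaces split/join-twice by one linear pass with an explicit first-in-line flag (alternative decomposition, same cost).

-- str(ord(c)) — shared primitive of both ports
def pvEnc (c : Char) : List Char := PySem.Int.toChars (c.toNat : Int)

-- ===== PORT A =====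
def encode_ascii_art (ascii_art : String) : String :=
  let lines := PySem.Chars.splitOn ascii_art.toList ['\n']
  let encoded_lines :=
    lines.foldl (fun acc line => acc ++ [PySem.Chars.join [','] (line.map pvEnc)]) []
  String.mk (PySem.Chars.join ['\n'] encoded_lines)

-- ===== PORT B =====
def encode_ascii_art_alt (ascii_art : String) : String :=
  let step := fun (st : List Char × Bool) (ch : Char) =>
    if ch = '\n' then (st.1 ++ ['\n'], true)
    else ((if st.2 then st.1 else st.1 ++ [',']) ++ pvEnc ch, false)
  String.mk (ascii_art.toList.foldl step ([], true)).1

-- ===== PRECONDITION & SPEC =====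
def Spec_encode_ascii_art (ascii_art : String) (out : String) : Prop := out = encode_ascii_art_alt ascii_art
instance (ascii_art : String) (out : String) : Decidable (Spec_encode_ascii_art ascii_art out) := by unfold Spec_encode_ascii_art; infer_instance

-- ===== CLAIM (what is proved, stated in full; the proofs are below) =====
def Claim_equal_encode_ascii_art : Prop := ∀ (ascii_art : String), Dom_encode_ascii_art ascii_art → Spec_encode_ascii_art ascii_art (encode_ascii_art ascii_art)

-- ===== LEMMAS AND PROOFS =====

-- reference splitter: Python's s.split('\n') as plain structural recursion
def pvSplit : List Char → List (List Char)
  | [] => [[]]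
  | c :: cs => if c = '\n' then [] :: pvSplit cs else (pvSplit cs).modifyHead (c :: ·)

-- reference emitter: what B's loop appends from state `first`
def pvF : Bool → List Char → List Char
  | _, [] => []
  | first, c :: cs =>
      if c = '\n' then '\n' :: pvF true cs
      else (if first then [] else [',']) ++ pvEnc c ++ pvF false cs

def pvLineEnc (line : List Char) : List Char := PySem.Chars.join [','] (line.map pvEnc)

theorem pvSplit_ne_nil (cs : List Char) : pvSplit cs ≠ [] := by
  induction cs with
  | nil => simp [pvSplit]
  | cons c cs ih =>
      simp only [pvSplit]
      split
      · simp
      · cases h : pvSplit cs with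
        | nil => exact absurd h ih
        | cons a t => simp [List.modifyHead]

theorem pv_go_eq (l : List Char) : ∀ (fuel : Nat) (cur : List Char) (accs : List (List Char)),
    l.length ≤ fuel →
    PySem.Chars.splitOn.go ['\n'] fuel l cur accs
      = accs.reverse ++ (pvSplit l).modifyHead (cur.reverse ++ ·) := by
  induction l with
  | nil =>
      intro fuel cur accs _
      cases fuel <;> simp [PySem.Chars.splitOn.go, pvSplit, List.modifyHead]
  | cons c cs ih =>
      intro fuel cur accs hf
      cases fuel with
      | zero => simp at hf
      | succ fuel =>
          simp only [PySem.Chars.splitOn.go]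
          by_cases hc : c = '\n'
          · subst hc
            simp only [List.isPrefixOf, beq_self_eq_true, Bool.true_and, if_pos]
            have hd : List.drop (['\n'] : List Char).length ('\n' :: cs) = cs := rfl
            rw [hd, ih fuel [] (cur.reverse :: accs) (by simpa using Nat.le_of_succ_le_succ hf)]
            simp only [pvSplit, List.modifyHead, List.reverse_cons,
              List.reverse_nil, List.nil_append, List.append_assoc, List.cons_append]
            cases pvSplit cs <;> simp
          · have hpre : List.isPrefixOf ['\n'] (c :: cs) = false := by
              simp [List.isPrefixOf]; exact fun h => (hc h.symm).elim
            rw [hpre]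
            simp only [Bool.false_eq_true, if_false]
            rw [ih fuel (c :: cur) accs (by simpa using Nat.le_of_succ_le_succ hf)]
            have : pvSplit (c :: cs) = (pvSplit cs).modifyHead (c :: ·) := by
              simp [pvSplit, hc]
            rw [this]
            obtain ⟨h, t, ht⟩ : ∃ h t, pvSplit cs = h :: t := by
              cases hs : pvSplit cs with
              | nil => exact absurd hs (pvSplit_ne_nil cs)
              | cons h t => exact ⟨h, t, rfl⟩
            simp [ht, List.modifyHead]

theorem pv_splitOn_eq (cs : List Char) : PySem.Chars.splitOn cs ['\n'] = pvSplit cs := by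
  unfold PySem.Chars.splitOn
  rw [pv_go_eq cs (cs.length + 1) [] [] (Nat.le_succ _)]
  cases hs : pvSplit cs with
  | nil => exact absurd hs (pvSplit_ne_nil cs)
  | cons h t => simp [List.modifyHead]

theorem pvLineEnc_append_singleton (p : List Char) (x : Char) (hp : p ≠ []) :
    pvLineEnc (p ++ [x]) = pvLineEnc p ++ ',' :: pvEnc x := by
  induction p with
  | nil => exact absurd rfl hp
  | cons a p ih =>
      cases p with
      | nil => simp [pvLineEnc, PySem.Chars.join, List.intercalate]
      | cons b q =>
          have := ih (by simp)
          simp only [pvLineEnc, List.cons_append, List.map_cons] at this ⊢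
          rw [PySem.Chars.join_cons_cons, PySem.Chars.join_cons_cons, this]
          simp

theorem pv_join_eq (cs : List Char) :
    PySem.Chars.join ['\n'] ((pvSplit cs).map pvLineEnc) = pvF true cs ∧
    ∀ p : List Char, p ≠ [] →
      PySem.Chars.join ['\n'] (((pvSplit cs).modifyHead (p ++ ·)).map pvLineEnc)
        = pvLineEnc p ++ pvF false cs := by
  induction cs with
  | nil =>
      constructor
      · simp [pvSplit, pvF, pvLineEnc, PySem.Chars.join, List.intercalate]
      · intro p _
        simp [pvSplit, pvF, pvLineEnc, PySem.Chars.join, List.intercalate, List.modifyHead]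
  | cons c cs ih =>
      by_cases hc : c = '\n'
      · subst hc
        obtain ⟨h, t, ht⟩ : ∃ h t, pvSplit cs = h :: t := by
          cases hs : pvSplit cs with
          | nil => exact absurd hs (pvSplit_ne_nil cs)
          | cons h t => exact ⟨h, t, rfl⟩
        have hjoin : PySem.Chars.join ['\n'] ((pvSplit cs).map pvLineEnc) = pvF true cs := ih.1
        constructor
        · have hsp : pvSplit ('\n' :: cs) = [] :: pvSplit cs := by simp [pvSplit]
          rw [hsp, ht, List.map_cons, List.map_cons, PySem.Chars.join_cons_cons,
            ← List.map_cons, ← ht, hjoin]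
          simp [pvF, pvLineEnc, PySem.Chars.join, List.intercalate]
        · intro p hp
          have hsp : pvSplit ('\n' :: cs) = [] :: pvSplit cs := by simp [pvSplit]
          rw [hsp]
          simp only [List.modifyHead, List.append_nil, ht, List.map_cons,
            PySem.Chars.join_cons_cons]
          rw [← List.map_cons, ← ht, hjoin]
          simp [pvF]
      · have hsp : pvSplit (c :: cs) = (pvSplit cs).modifyHead (c :: ·) := by
          simp [pvSplit, hc]
        constructor
        · rw [hsp]
          have := ih.2 [c] (by simp)
          simpa [pvF, hc, pvLineEnc, PySem.Chars.join, List.intercalate] using this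
        · intro p hp
          rw [hsp]
          obtain ⟨h, t, ht⟩ : ∃ h t, pvSplit cs = h :: t := by
            cases hs : pvSplit cs with
            | nil => exact absurd hs (pvSplit_ne_nil cs)
            | cons h t => exact ⟨h, t, rfl⟩
          have step : ((pvSplit cs).modifyHead (c :: ·)).modifyHead (p ++ ·)
              = (pvSplit cs).modifyHead ((p ++ [c]) ++ ·) := by
            simp [ht, List.modifyHead]
          rw [step, ih.2 (p ++ [c]) (by simp), pvLineEnc_append_singleton p c hp]
          simp [pvF, hc]

theorem pv_foldl_eq (cs : List Char) : ∀ (acc : List Char) (first : Bool),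
    (cs.foldl (fun (st : List Char × Bool) (ch : Char) =>
        if ch = '\n' then (st.1 ++ ['\n'], true)
        else ((if st.2 then st.1 else st.1 ++ [',']) ++ pvEnc ch, false)) (acc, first)).1
      = acc ++ pvF first cs := by
  induction cs with
  | nil => intro acc first; simp [pvF]
  | cons c cs ih =>
      intro acc first
      by_cases hc : c = '\n'
      · subst hc
        simp only [List.foldl_cons, reduceIte]
        rw [ih (acc ++ ['\n']) true]
        simp [pvF]
      · simp only [List.foldl_cons, if_neg hc]
        rw [ih _ false]
        cases first <;> simp [pvF, hc]

-- ===== VERDICT (by name: the statement is the Claim_ definition above) =====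
theorem encode_ascii_art_spec : Claim_equal_encode_ascii_art := by
  intro s _
  unfold Spec_encode_ascii_art
  simp only [encode_ascii_art, encode_ascii_art_alt]
  rw [pv_splitOn_eq, PySem.List.foldl_append_singleton_eq_map, pv_foldl_eq s.toList [] true]
  have hfun : (fun line => PySem.Chars.join [','] (List.map pvEnc line)) = pvLineEnc := rfl
  simp only [List.nil_append]
  rw [hfun, (pv_join_eq s.toList).1]
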